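-- pv_equiv track=rewrite | github.com/dokan722/LeetCode | Python/Problems/Problems/problem2644.py | maxDivScore
-- ===== SOURCE A (Python) =====
-- from typing import List, Set
--
-- def maxDivScore(nums: List[int], divisors: List[int]) -> int:
--     n = len(nums)
--     m = len(divisors)
--     result = divisors[0]
--     best = 0
--     for i in range(m):
--         cur = 0
--         for j in range(n):
--             if nums[j] % divisors[i] == 0:
--                 cur += 1
--         if cur > best or (cur == best and divisors[i] < result):
--             best = cur
--             result = divisors[i]
--
--     return result
-- ===== SOURCE B (Python) =====
-- def maxDivScore(nums, divisors):
--     freq = {}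
--     for x in nums:
--         freq[x] = freq.get(x, 0) + 1
--     best_d, best_c = None, -1
--     for d in sorted(set(divisors)):
--         c = 0
--         for v, k in freq.items():
--             if v % d == 0:
--                 c += k
--         if c > best_c:
--             best_d, best_c = d, c
--     return best_d
-- ===== Notes on version B (the rewrite author's own statement) =====
-- stated objective: faster
-- what changed: Counts via a frequency dict over distinct nums values (weighted by multiplicity) instead of rescanning nums per divisor, and walks divisors sorted+deduplicated ascending so a bare strict '>' yields the smallest max-achiever with no tie-breaking comparison.
import Mathlib
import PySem

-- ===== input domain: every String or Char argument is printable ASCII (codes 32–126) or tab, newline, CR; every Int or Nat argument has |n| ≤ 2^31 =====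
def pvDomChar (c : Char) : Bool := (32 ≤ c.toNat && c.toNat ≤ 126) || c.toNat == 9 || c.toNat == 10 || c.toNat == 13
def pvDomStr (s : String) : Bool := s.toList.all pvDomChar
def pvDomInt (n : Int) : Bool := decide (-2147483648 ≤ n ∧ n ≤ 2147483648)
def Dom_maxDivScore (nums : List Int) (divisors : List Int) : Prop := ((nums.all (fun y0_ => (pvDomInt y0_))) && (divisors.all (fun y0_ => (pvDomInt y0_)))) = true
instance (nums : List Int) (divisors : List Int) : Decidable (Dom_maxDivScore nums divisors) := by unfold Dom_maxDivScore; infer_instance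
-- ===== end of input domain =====

-- B replaces the per-divisor scan of nums by a frequency dict over distinct values and walks the
-- divisors sorted+deduplicated ascending, so a bare strict '>' picks the smallest max-achiever.

-- ===== PORT A =====
def maxDivScore (nums : List Int) (divisors : List Int) : Int :=
  let n : Int := nums.length
  let m : Int := divisors.length
  let st :=
    (PySem.List.pyRange 0 m 1).foldl
      (fun (st : Int × Int) i =>
        let cur :=
          (PySem.List.pyRange 0 n 1).foldl
            (fun c j =>
              if PySem.Int.mod (PySem.List.pyGetD nums j 0) (PySem.List.pyGetD divisors i 0) = 0
              then c + 1 else c) (0 : Int)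
        if cur > st.2 ∨ (cur = st.2 ∧ PySem.List.pyGetD divisors i 0 < st.1)
        then (PySem.List.pyGetD divisors i 0, cur) else st)
      (PySem.List.pyGetD divisors 0 0, (0 : Int))  -- divisors[0]: Pre_ excludes divisors = []
  st.1

-- ===== PORT B =====
def maxDivScore_alt (nums : List Int) (divisors : List Int) : Int :=
  let freq : PySem.Dict Int Int :=
    nums.foldl (fun d x => d.insert x (d.getD x 0 + 1)) PySem.Dict.empty
  let st : Option Int × Int :=
    (PySem.List.sorted (PySem.Set.ofList divisors) (fun y => y) false).foldl
      (fun st d =>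
        let c : Int := freq.items.foldl
          (fun c p => if PySem.Int.mod p.1 d = 0 then c + p.2 else c) 0
        if c > st.2 then (some d, c) else st)
      (none, -1)
  st.1.getD 0  -- best_d; Python's None is only reached when divisors = [], excluded by Pre_

-- ===== PRECONDITION & SPEC =====
-- A raises IndexError on empty divisors and ZeroDivisionError when 0 is a divisor and nums is
-- nonempty (with nums = [] the modulo is never evaluated); Pre_ excludes exactly those.
def Pre_maxDivScore (nums : List Int) (divisors : List Int) : Prop :=
  divisors ≠ [] ∧ (nums ≠ [] → (0 : Int) ∉ divisors)
instance (nums : List Int) (divisors : List Int) : Decidable (Pre_maxDivScore nums divisors) := by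
  unfold Pre_maxDivScore; infer_instance
def pvWitness_maxDivScore : List Int × List Int := ([6, 4, 3], [2, 3, 5])

def Spec_maxDivScore (nums : List Int) (divisors : List Int) (out : Int) : Prop := out = maxDivScore_alt nums divisors
instance (nums : List Int) (divisors : List Int) (out : Int) : Decidable (Spec_maxDivScore nums divisors out) := by unfold Spec_maxDivScore; infer_instance

-- ===== CLAIM (what is proved, stated in full; the proofs are below) =====
def Claim_equal_maxDivScore : Prop := ∀ (nums : List Int) (divisors : List Int), Dom_maxDivScore nums divisors → Pre_maxDivScore nums divisors → Spec_maxDivScore nums divisors (maxDivScore nums divisors)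

-- ===== LEMMAS AND PROOFS =====

-- the divisibility count both programs compute (A: per-divisor scan; B: weighted sum over distinct values)
def pvCnt (nums : List Int) (d : Int) : Int :=
  nums.foldl (fun c x => c + (if PySem.Int.mod x d = 0 then (1 : Int) else 0)) 0

-- A's update step, expressed on the divisor value
def pvStep (nums : List Int) (st : Int × Int) (d : Int) : Int × Int :=
  if pvCnt nums d > st.2 ∨ (pvCnt nums d = st.2 ∧ d < st.1) then (d, pvCnt nums d) else st

-- B's update step, expressed on the divisor value
def pvBStep (nums : List Int) (st : Option Int × Int) (d : Int) : Option Int × Int :=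
  if pvCnt nums d > st.2 then (some d, pvCnt nums d) else st

theorem pvCnt_fold_ge (nums : List Int) (d : Int) (c : Int) :
    c ≤ nums.foldl (fun c x => c + (if PySem.Int.mod x d = 0 then (1 : Int) else 0)) c := by
  induction nums generalizing c with
  | nil => simp
  | cons x t ih =>
    simp only [List.foldl_cons]
    refine le_trans ?_ (ih _)
    split <;> omega

theorem pvCnt_nonneg (nums : List Int) (d : Int) : 0 ≤ pvCnt nums d :=
  pvCnt_fold_ge nums d 0

theorem pvCnt_eq_countP (nums : List Int) (d : Int) :
    pvCnt nums d = ((nums.countP (fun x => decide (PySem.Int.mod x d = 0)) : Nat) : Int) := by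
  unfold pvCnt
  have h := PySem.List.foldl_count_if (fun x => decide (PySem.Int.mod x d = 0)) nums 0
  simp only [decide_eq_true_eq] at h
  rw [show (fun (c : Int) x => c + (if PySem.Int.mod x d = 0 then (1 : Int) else 0))
      = (fun (c : Int) x => if PySem.Int.mod x d = 0 then c + 1 else c) from by
    funext c x; split <;> omega]
  omega

-- A's inner loop computes pvCnt
theorem inner_eq_cnt (nums : List Int) (d : Int) :
    (PySem.List.pyRange 0 (nums.length : Int) 1).foldl
      (fun c j => if PySem.Int.mod (PySem.List.pyGetD nums j 0) d = 0 then c + 1 else c) (0 : Int)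
    = pvCnt nums d := by
  rw [PySem.List.foldl_pyRange_zero_pyGetD' nums 0
    (fun c x => if PySem.Int.mod x d = 0 then c + 1 else c) 0]
  unfold pvCnt
  congr 1
  funext c x
  split <;> omega

-- the invariant both programs' results satisfy: member, its count, max count, smallest achiever
def pvInv (nums : List Int) (seen : List Int) (st : Int × Int) : Prop :=
  st.1 ∈ seen ∧ pvCnt nums st.1 = st.2 ∧ (∀ d ∈ seen, pvCnt nums d ≤ st.2) ∧
    (∀ d ∈ seen, pvCnt nums d = st.2 → st.1 ≤ d)

theorem pvStep_inv (nums : List Int) (seen : List Int) (st : Int × Int) (d : Int)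
    (h : pvInv nums seen st) : pvInv nums (seen ++ [d]) (pvStep nums st d) := by
  obtain ⟨hmem, hcnt, hmax, hmin⟩ := h
  unfold pvStep
  split_ifs with hc
  · rcases hc with hgt | ⟨heq, hlt⟩
    · refine ⟨by simp, rfl, fun e he => ?_, fun e he hce => ?_⟩
      · show pvCnt nums e ≤ pvCnt nums d
        rcases List.mem_append.mp he with he | he
        · have := hmax e he; omega
        · simp only [List.mem_singleton] at he; subst he; omega
      · show d ≤ e
        change pvCnt nums e = pvCnt nums d at hce
        rcases List.mem_append.mp he with he | he
        · have := hmax e he; omega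
        · simp only [List.mem_singleton] at he; omega
    · refine ⟨by simp, rfl, fun e he => ?_, fun e he hce => ?_⟩
      · show pvCnt nums e ≤ pvCnt nums d
        rcases List.mem_append.mp he with he | he
        · have := hmax e he; omega
        · simp only [List.mem_singleton] at he; subst he; omega
      · show d ≤ e
        change pvCnt nums e = pvCnt nums d at hce
        rcases List.mem_append.mp he with he | he
        · have := hmin e he (by omega); omega
        · simp only [List.mem_singleton] at he; omega
  · push_neg at hc
    refine ⟨List.mem_append.mpr (Or.inl hmem), hcnt, fun e he => ?_, fun e he hce => ?_⟩
    · rcases List.mem_append.mp he with he | he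
      · exact hmax e he
      · simp only [List.mem_singleton] at he; subst he; omega
    · rcases List.mem_append.mp he with he | he
      · exact hmin e he hce
      · simp only [List.mem_singleton] at he; subst he
        have := hc.2 hce; omega

theorem pvFold_inv (nums : List Int) (l seen : List Int) (st : Int × Int)
    (h : pvInv nums seen st) : pvInv nums (seen ++ l) (l.foldl (pvStep nums) st) := by
  induction l generalizing seen st with
  | nil => simpa using h
  | cons d t ih =>
    have := ih (seen ++ [d]) (pvStep nums st d) (pvStep_inv nums seen st d h)
    simpa [List.append_assoc] using this

theorem maxDivScore_eq_fold (nums : List Int) (d0 : Int) (t : List Int) :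
    maxDivScore nums (d0 :: t) = (t.foldl (pvStep nums) (d0, pvCnt nums d0)).1 := by
  unfold maxDivScore
  simp only [inner_eq_cnt]
  rw [show (fun (st : Int × Int) i =>
        if pvCnt nums (PySem.List.pyGetD (d0 :: t) i 0) > st.2 ∨
            (pvCnt nums (PySem.List.pyGetD (d0 :: t) i 0) = st.2 ∧
              PySem.List.pyGetD (d0 :: t) i 0 < st.1)
        then (PySem.List.pyGetD (d0 :: t) i 0, pvCnt nums (PySem.List.pyGetD (d0 :: t) i 0))
        else st)
      = (fun (st : Int × Int) i => pvStep nums st (PySem.List.pyGetD (d0 :: t) i 0)) from rfl]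
  rw [PySem.List.foldl_pyRange_zero_pyGetD' (d0 :: t) 0 (pvStep nums)
    (PySem.List.pyGetD (d0 :: t) 0 0, (0 : Int))]
  rw [PySem.List.pyGetD_zero_cons]
  simp only [List.foldl_cons]
  have h0 : pvStep nums (d0, 0) d0 = (d0, pvCnt nums d0) := by
    have := pvCnt_nonneg nums d0
    unfold pvStep
    split_ifs with hc
    · rcases hc with h | h
      · rfl
      · exact absurd h.2 (lt_irrefl _)
    · push_neg at hc
      have : pvCnt nums d0 = 0 := le_antisymm (by omega) this
      simp [this]
  rw [h0]

-- a guarded accumulation is the accumulator plus a guarded sum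
theorem pvFoldlIfAdd (P : Int → Prop) [DecidablePred P] (f : Int → Int) (s : List Int) (c : Int) :
    s.foldl (fun c v => if P v then c + f v else c) c
      = c + (s.map (fun v => if P v then f v else 0)).sum := by
  induction s generalizing c with
  | nil => simp
  | cons a t ih =>
    simp only [List.foldl_cons, List.map_cons, List.sum_cons]
    rw [ih]
    split <;> ring

theorem pvSumZero (P : Int → Prop) [DecidablePred P] (x : Int) (t : List Int) (hx : x ∉ t) :
    (t.map (fun v => if P v then (if v = x then (1 : Int) else 0) else 0)).sum = 0 := by
  induction t with
  | nil => simp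
  | cons a s ih =>
    have hax : a ≠ x := fun h => hx (h ▸ List.mem_cons_self)
    have hxs : x ∉ s := fun h => hx (List.mem_cons_of_mem a h)
    simp only [List.map_cons, List.sum_cons, hax, if_false, ite_self, ih hxs, add_zero]

theorem pvSumSingle (P : Int → Prop) [DecidablePred P] (x : Int) (s : List Int) (hs : s.Nodup) :
    (s.map (fun v => if P v then (if v = x then (1 : Int) else 0) else 0)).sum
      = if P x ∧ x ∈ s then 1 else 0 := by
  induction s with
  | nil => simp
  | cons a t ih =>
    obtain ⟨hat, hnd⟩ := List.nodup_cons.mp hs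
    simp only [List.map_cons, List.sum_cons]
    by_cases hax : a = x
    · subst hax
      rw [pvSumZero P a t hat]
      by_cases hP : P a <;> simp [hP]
    · have hxa : ¬ (x = a) := fun h => hax h.symm
      rw [ih hnd]
      simp [hax, hxa, List.mem_cons]

-- summing counts over a duplicate-free value list is counting in the base list
theorem pvSumCount (P : Int → Prop) [DecidablePred P] (l : List Int) (s : List Int)
    (hs : s.Nodup) :
    (s.map (fun v => if P v then ((l.count v : Nat) : Int) else 0)).sum
      = ((l.countP (fun y => decide (P y ∧ y ∈ s)) : Nat) : Int) := by
  induction l with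
  | nil => simp
  | cons x l ih =>
    have hsplit : (s.map (fun v => if P v then (((x :: l).count v : Nat) : Int) else 0))
        = s.map (fun v => (if P v then ((l.count v : Nat) : Int) else 0)
            + (if P v then (if v = x then (1 : Int) else 0) else 0)) := by
      refine List.map_congr_left (fun v _ => ?_)
      rcases eq_or_ne v x with hvx | hvx
      · subst hvx
        by_cases hP : P v <;> simp [List.count_cons, hP]
      · have hxv : ¬ x = v := fun h => hvx h.symm
        by_cases hP : P v <;> simp [List.count_cons, hP, hvx, hxv]
    rw [hsplit, PySem.List.sum_map_add_int, ih, pvSumSingle P x s hs, List.countP_cons]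
    by_cases hc : P x ∧ x ∈ s <;> simp [hc]

-- B's inner loop over the frequency dict computes pvCnt
theorem pvAltCnt (nums : List Int) (d : Int) :
    (nums.foldl (fun dd x => dd.insert x (dd.getD x 0 + 1)) PySem.Dict.empty).items.foldl
      (fun (c : Int) p => if PySem.Int.mod p.1 d = 0 then c + p.2 else c) 0 = pvCnt nums d := by
  rw [PySem.Dict.foldl_insert_getD_add_one_eq_counter, PySem.Dict.items_counter, List.foldl_map]
  rw [pvFoldlIfAdd (fun v => PySem.Int.mod v d = 0) (fun v => ((nums.count v : Nat) : Int))
      (PySem.Set.ofList nums) 0]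
  rw [pvSumCount (fun v => PySem.Int.mod v d = 0) nums (PySem.Set.ofList nums)
      (PySem.Set.nodup_ofList nums)]
  rw [pvCnt_eq_countP]
  have : nums.countP (fun y => decide (PySem.Int.mod y d = 0 ∧ y ∈ PySem.Set.ofList nums))
      = nums.countP (fun x => decide (PySem.Int.mod x d = 0)) := by
    refine List.countP_congr (fun y hy => ?_)
    simp [PySem.Set.mem_ofList, hy]
  omega

-- B's fold over a strictly increasing divisor list: max count, first (= smallest) achiever
theorem pvBFold (nums : List Int) (rest : List Int) :
    ∀ (seen : List Int) (r b : Int),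
    (seen ++ rest).Pairwise (· < ·) →
    r ∈ seen → pvCnt nums r = b →
    (∀ e ∈ seen, pvCnt nums e ≤ b) →
    (∀ e ∈ seen, pvCnt nums e = b → r ≤ e) →
    ∃ r' b', rest.foldl (pvBStep nums) (some r, b) = (some r', b') ∧
      r' ∈ seen ++ rest ∧ pvCnt nums r' = b' ∧
      (∀ e ∈ seen ++ rest, pvCnt nums e ≤ b') ∧
      (∀ e ∈ seen ++ rest, pvCnt nums e = b' → r' ≤ e) := by
  induction rest with
  | nil =>
    intro seen r b _ hmem hcnt hmax hmin
    exact ⟨r, b, rfl, by simpa using hmem, hcnt, by simpa using hmax, by simpa using hmin⟩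
  | cons d t ih =>
    intro seen r b hpair hmem hcnt hmax hmin
    have hassoc : seen ++ d :: t = (seen ++ [d]) ++ t := by simp
    have hpair' : ((seen ++ [d]) ++ t).Pairwise (· < ·) := by rwa [← hassoc]
    simp only [List.foldl_cons]
    by_cases hgt : pvCnt nums d > b
    · have hstep : pvBStep nums (some r, b) d = (some d, pvCnt nums d) := by
        unfold pvBStep; simp [hgt]
      rw [hstep]
      obtain ⟨r', b', heq, hm, hc, hmx, hmn⟩ :=
        ih (seen ++ [d]) d (pvCnt nums d) hpair' (by simp) rfl
          (by intro e he
              rcases List.mem_append.mp he with he | he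
              · have := hmax e he; omega
              · simp only [List.mem_singleton] at he; subst he; omega)
          (by intro e he hce
              rcases List.mem_append.mp he with he | he
              · have := hmax e he; omega
              · simp only [List.mem_singleton] at he; omega)
      exact ⟨r', b', heq, by rwa [hassoc], hc, by rwa [hassoc], by rwa [hassoc]⟩
    · have hstep : pvBStep nums (some r, b) d = (some r, b) := by
        unfold pvBStep; simp only []
        rw [if_neg hgt]
      rw [hstep]
      have hrd : r < d := by
        have := (List.pairwise_append.mp hpair).2.2 r hmem d List.mem_cons_self
        exact this
      obtain ⟨r', b', heq, hm, hc, hmx, hmn⟩ :=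
        ih (seen ++ [d]) r b hpair' (List.mem_append.mpr (Or.inl hmem)) hcnt
          (by intro e he
              rcases List.mem_append.mp he with he | he
              · exact hmax e he
              · simp only [List.mem_singleton] at he; subst he; omega)
          (by intro e he hce
              rcases List.mem_append.mp he with he | he
              · exact hmin e he hce
              · simp only [List.mem_singleton] at he; subst he; omega)
      exact ⟨r', b', heq, by rwa [hassoc], hc, by rwa [hassoc], by rwa [hassoc]⟩

-- ===== VERDICT (by name: the statement is the Claim_ definition above) =====
theorem maxDivScore_spec : Claim_equal_maxDivScore := by
  intro nums divisors _ hpre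
  obtain ⟨hne, _⟩ := hpre
  obtain ⟨d0, t0, hdiv⟩ := List.exists_cons_of_ne_nil hne
  unfold Spec_maxDivScore
  -- A's side: the interleaved fold satisfies pvInv over divisors
  have hA : pvInv nums divisors (t0.foldl (pvStep nums) (d0, pvCnt nums d0)) := by
    rw [hdiv]
    have hinv : pvInv nums ([d0] ++ t0) (t0.foldl (pvStep nums) (d0, pvCnt nums d0)) := by
      apply pvFold_inv
      refine ⟨List.mem_singleton_self _, rfl, ?_, ?_⟩
      · intro d hd; rw [List.mem_singleton] at hd; subst hd; exact le_refl _
      · intro d hd _; rw [List.mem_singleton] at hd; subst hd; exact le_refl _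
    simpa using hinv
  set stA := t0.foldl (pvStep nums) (d0, pvCnt nums d0) with hstA
  obtain ⟨hAmem, hAcnt, hAmax, hAmin⟩ := hA
  have hAeq : maxDivScore nums divisors = stA.1 := by
    rw [hdiv]; exact maxDivScore_eq_fold nums d0 t0
  -- B's side
  set ds := PySem.List.sorted (PySem.Set.ofList divisors) (fun y => y) false with hds
  have hmem_ds : ∀ x : Int, x ∈ ds ↔ x ∈ divisors := by
    intro x
    rw [hds, PySem.List.mem_sorted, PySem.Set.mem_ofList]
  have hdsne : ds ≠ [] := by
    intro h
    rw [hds, PySem.List.sorted_eq_nil_iff] at h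
    have : d0 ∈ PySem.Set.ofList divisors := (PySem.Set.mem_ofList divisors d0).mpr (by rw [hdiv]; exact List.mem_cons_self)
    rw [h] at this
    exact absurd this List.not_mem_nil
  obtain ⟨e0, t, hdseq⟩ := List.exists_cons_of_ne_nil hdsne
  have hpair : ds.Pairwise (· < ·) := by
    rw [hds]; exact PySem.List.sorted_ofList_pairwise_lt divisors
  have hfn : (fun (st : Option Int × Int) d =>
        let c : Int := (nums.foldl (fun dd x => dd.insert x (dd.getD x 0 + 1))
            PySem.Dict.empty).items.foldl
          (fun (c : Int) p => if PySem.Int.mod p.1 d = 0 then c + p.2 else c) 0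
        if c > st.2 then (some d, c) else st)
      = pvBStep nums := by
    funext st d
    show (if (nums.foldl (fun dd x => dd.insert x (dd.getD x 0 + 1))
            PySem.Dict.empty).items.foldl
          (fun (c : Int) p => if PySem.Int.mod p.1 d = 0 then c + p.2 else c) 0 > st.2
        then (some d, (nums.foldl (fun dd x => dd.insert x (dd.getD x 0 + 1))
            PySem.Dict.empty).items.foldl
          (fun (c : Int) p => if PySem.Int.mod p.1 d = 0 then c + p.2 else c) 0) else st)
        = pvBStep nums st d
    rw [pvAltCnt nums d]; rfl
  have hBalt : maxDivScore_alt nums divisors = (ds.foldl (pvBStep nums) (none, -1)).1.getD 0 :=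
    congrArg (fun f => (((PySem.List.sorted (PySem.Set.ofList divisors) (fun y => y) false).foldl
      f ((none : Option Int), (-1 : Int))).1).getD 0) hfn
  rw [hBalt, hdseq]
  simp only [List.foldl_cons]
  have hfirst : pvBStep nums (none, -1) e0 = (some e0, pvCnt nums e0) := by
    have := pvCnt_nonneg nums e0
    unfold pvBStep
    rw [if_pos (by omega)]
  rw [hfirst]
  obtain ⟨r', b', heq, hm, hc, hmx, hmn⟩ :=
    pvBFold nums t [e0] e0 (pvCnt nums e0) (by rw [hdseq] at hpair; simpa using hpair)
      List.mem_cons_self rfl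
      (by intro e he; rw [List.mem_singleton] at he; subst he; exact le_refl _)
      (by intro e he _; rw [List.mem_singleton] at he; subst he; exact le_refl _)
  rw [heq]
  simp only [Option.getD_some]
  -- both results are the smallest divisor achieving the maximal count
  have hmds : ∀ x : Int, x ∈ [e0] ++ t ↔ x ∈ divisors := by
    intro x; rw [show ([e0] ++ t : List Int) = ds from by rw [hdseq]; rfl]; exact hmem_ds x
  have hr'div : r' ∈ divisors := (hmds r').mp hm
  have hA1ds : stA.1 ∈ [e0] ++ t := (hmds stA.1).mpr hAmem
  have hb1 : pvCnt nums r' ≤ stA.2 := hAmax r' hr'div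
  have hb2 : pvCnt nums stA.1 ≤ b' := hmx stA.1 hA1ds
  have hbeq : b' = stA.2 := by omega
  have h1 : stA.1 ≤ r' := hAmin r' hr'div (by omega)
  have h2 : r' ≤ stA.1 := hmn stA.1 hA1ds (by omega)
  rw [hAeq]
  omega
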